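-- pv_equiv track=rewrite | github.com/ym1522/Algorithm-study | 김수빈/codingmasters/3345_cm.py | solution
-- ===== SOURCE A (Python) =====
-- def get_indices(arr, value='#'):
--     result = []
--     for i in range(len(arr)):
--         indices = list(filter(lambda x: arr[i][x] == value, range(len(arr[i]))))
--         result += list(map(lambda x: (i, x), indices))
--     return result
--
-- def solution(arr):
--     indices = get_indices(arr, '#')
--     if len(indices) != 4: return "NO"
--     x, y = indices[0]
--
--     if indices == [(i, y) for i in range(x, x + 4)] or indices == [(x, j) for j in range(y, y + 4)]:
--         return "YES"
--     if (x, y + 1) in indices and (x + 1, y) in indices and (x + 1, y + 1) in indices: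
--         return "YES"
--
--     if (x, y + 1) in indices and (x, y + 2) in indices and (x + 1, y) in indices:
--         return "YES"
--     elif (x, y + 1) in indices and (x, y + 2) in indices and (x + 1, y + 2) in indices:
--         return "YES"
--     elif (x + 1, y) in indices and (x + 1, y + 1) in indices and (x + 1, y + 2) in indices:
--         return "YES"
--     elif (x + 1, y - 2) in indices and (x + 1, y - 1) in indices and (x + 1, y) in indices:
--         return "YES"
--     elif (x + 1, y) in indices and (x + 2, y) in indices and (x + 2, y + 1) in indices:
--         return "YES"
--     elif (x + 1, y) in indices and (x + 2, y) in indices and (x + 2, y - 1) in indices: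
--         return "YES"
--
--     if (x + 1, y) in indices and (x + 1, y + 1) in indices and (x + 2, y + 1) in indices:
--         return "YES"
--     elif (x + 1, y) in indices and (x + 1, y + 1) in indices and (x + 2, y + 1) in indices:
--         return "YES"
--     elif (x, y + 1) in indices and (x + 1, y + 1) in indices and (x + 1, y + 2) in indices:
--         return "YES"
--     elif (x, y + 1) in indices and (x + 1, y - 1) in indices and (x + 1, y) in indices:
--         return "YES"
--
--     if (x, y + 1) in indices and (x, y + 2) in indices and (x + 1, y + 1) in indices:
--         return "YES"
--     elif (x, y + 1) in indices and (x, y + 2) in indices and (x - 1, y + 1) in indices: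
--         return "YES"
--     elif (x + 1, y) in indices and (x + 1, y + 1) in indices and (x + 2, y) in indices:
--         return "YES"
--     elif (x + 1, y) in indices and (x + 1, y - 1) in indices and (x + 2, y) in indices:
--         return "YES"
--
--     return "NO"
-- ===== SOURCE B (Python) =====
-- # B: canonical-offset table lookup instead of A's branch cascade.
-- # Offsets of the three non-anchor '#' cells relative to the reading-order-first
-- # '#' cell, kept in reading order; the table transcribes exactly the shapes A's
-- # branches accept (including its idiosyncratic set, minus the unreachable one).
-- ACCEPTED = {
--     ((0, 1), (0, 2), (0, 3)),   # I horizontal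
--     ((1, 0), (2, 0), (3, 0)),   # I vertical
--     ((0, 1), (1, 0), (1, 1)),   # O
--     ((0, 1), (0, 2), (1, 0)),
--     ((0, 1), (0, 2), (1, 2)),
--     ((1, 0), (1, 1), (1, 2)),
--     ((1, -2), (1, -1), (1, 0)),
--     ((1, 0), (2, 0), (2, 1)),
--     ((1, 0), (2, -1), (2, 0)),
--     ((1, 0), (1, 1), (2, 1)),
--     ((0, 1), (1, 1), (1, 2)),
--     ((0, 1), (1, -1), (1, 0)),
--     ((0, 1), (0, 2), (1, 1)),
--     ((1, 0), (1, 1), (2, 0)),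
--     ((1, -1), (1, 0), (2, 0)),
-- }
--
-- def solution(arr):
--     cells = [(i, j) for i, row in enumerate(arr) for j, c in enumerate(row) if c == '#']
--     if len(cells) != 4:
--         return "NO"
--     x, y = cells[0]
--     offs = tuple((i - x, j - y) for i, j in cells[1:])
--     return "YES" if offs in ACCEPTED else "NO"
-- ===== Notes on version B (the rewrite author's own statement) =====
-- stated objective: simpler
-- what changed: B replaces A's cascade of sixteen hand-written membership branches (each scanning the cell list) by normalising the four '#' cells to an offset triple relative to the reading-order-first cell and looking that triple up in a fixed table of the accepted shapes; the grid is scanned in one enumerate pass instead of per-index filter/map lambdas.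
import Mathlib
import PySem

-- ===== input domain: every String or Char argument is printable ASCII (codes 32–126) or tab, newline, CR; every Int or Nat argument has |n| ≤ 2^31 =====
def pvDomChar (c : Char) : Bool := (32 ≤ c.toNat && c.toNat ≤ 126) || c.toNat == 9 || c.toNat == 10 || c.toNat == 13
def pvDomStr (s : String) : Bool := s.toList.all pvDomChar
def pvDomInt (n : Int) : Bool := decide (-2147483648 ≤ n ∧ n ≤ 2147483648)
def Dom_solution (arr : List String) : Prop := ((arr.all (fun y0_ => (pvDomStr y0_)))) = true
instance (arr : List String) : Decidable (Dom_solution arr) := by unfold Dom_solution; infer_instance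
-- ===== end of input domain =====

-- B replaces A's cascade of membership branches by a single lookup of the canonical
-- offset triple (the three non-anchor '#' cells relative to the reading-order-first
-- one) in a fixed table of the shapes A accepts (objective: simpler).

-- ===== PORT A =====
def get_indices (arr : List String) (value : Char) : List (Int × Int) :=
  (PySem.List.pyRange 0 (arr.length : Int)).foldl
    (fun result i =>
      let row := (PySem.List.pyGet? arr i).getD ""
      result ++
        ((PySem.List.pyRange 0 (PySem.Str.len row)).filter
            (fun x => PySem.Str.pyGet? row x == some value)).map (fun x => (i, x)))
    []

def solution (arr : List String) : String :=
  let indices := get_indices arr '#'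
  if indices.length ≠ 4 then "NO"
  else
    let xy := (PySem.List.pyGet? indices 0).getD (0, 0)
    let x := xy.1
    let y := xy.2
    if indices == (PySem.List.pyRange x (x + 4)).map (fun i => (i, y))
        || indices == (PySem.List.pyRange y (y + 4)).map (fun j => (x, j)) then "YES"
    else if indices.contains (x, y+1) && indices.contains (x+1, y) && indices.contains (x+1, y+1) then "YES"
    else if indices.contains (x, y+1) && indices.contains (x, y+2) && indices.contains (x+1, y) then "YES"
    else if indices.contains (x, y+1) && indices.contains (x, y+2) && indices.contains (x+1, y+2) then "YES"
    else if indices.contains (x+1, y) && indices.contains (x+1, y+1) && indices.contains (x+1, y+2) then "YES"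
    else if indices.contains (x+1, y-2) && indices.contains (x+1, y-1) && indices.contains (x+1, y) then "YES"
    else if indices.contains (x+1, y) && indices.contains (x+2, y) && indices.contains (x+2, y+1) then "YES"
    else if indices.contains (x+1, y) && indices.contains (x+2, y) && indices.contains (x+2, y-1) then "YES"
    else if indices.contains (x+1, y) && indices.contains (x+1, y+1) && indices.contains (x+2, y+1) then "YES"
    else if indices.contains (x+1, y) && indices.contains (x+1, y+1) && indices.contains (x+2, y+1) then "YES"
    else if indices.contains (x, y+1) && indices.contains (x+1, y+1) && indices.contains (x+1, y+2) then "YES"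
    else if indices.contains (x, y+1) && indices.contains (x+1, y-1) && indices.contains (x+1, y) then "YES"
    else if indices.contains (x, y+1) && indices.contains (x, y+2) && indices.contains (x+1, y+1) then "YES"
    else if indices.contains (x, y+1) && indices.contains (x, y+2) && indices.contains (x-1, y+1) then "YES"
    else if indices.contains (x+1, y) && indices.contains (x+1, y+1) && indices.contains (x+2, y) then "YES"
    else if indices.contains (x+1, y) && indices.contains (x+1, y-1) && indices.contains (x+2, y) then "YES"
    else "NO"

-- ===== PORT B =====
-- the offset triples A's branches accept (in reading order), minus the unreachable one
def acceptedShapes : List (List (Int × Int)) :=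
  [ [(0, 1), (0, 2), (0, 3)],
    [(1, 0), (2, 0), (3, 0)],
    [(0, 1), (1, 0), (1, 1)],
    [(0, 1), (0, 2), (1, 0)],
    [(0, 1), (0, 2), (1, 2)],
    [(1, 0), (1, 1), (1, 2)],
    [(1, -2), (1, -1), (1, 0)],
    [(1, 0), (2, 0), (2, 1)],
    [(1, 0), (2, -1), (2, 0)],
    [(1, 0), (1, 1), (2, 1)],
    [(0, 1), (1, 1), (1, 2)],
    [(0, 1), (1, -1), (1, 0)],
    [(0, 1), (0, 2), (1, 1)],
    [(1, 0), (1, 1), (2, 0)],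
    [(1, -1), (1, 0), (2, 0)] ]

-- Source B's cells comprehension
def pyCells (arr : List String) : List (Int × Int) :=
  (PySem.List.enumerate arr).flatMap (fun p =>
    ((PySem.List.enumerate p.2.toList).filter (fun q => q.2 == '#')).map
      (fun q => (p.1, q.1)))

def solution_alt (arr : List String) : String :=
  let cells := pyCells arr
  if cells.length ≠ 4 then "NO"
  else
    let xy := (PySem.List.pyGet? cells 0).getD (0, 0)
    let offs := (cells.drop 1).map (fun c => (c.1 - xy.1, c.2 - xy.2))
    if acceptedShapes.contains offs then "YES" else "NO"

-- ===== PRECONDITION & SPEC =====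
def Spec_solution (arr : List String) (out : String) : Prop := out = solution_alt arr
instance (arr : List String) (out : String) : Decidable (Spec_solution arr out) := by unfold Spec_solution; infer_instance

-- ===== CLAIM (what is proved, stated in full; the proofs are below) =====
def Claim_equal_solution : Prop := ∀ (arr : List String), Dom_solution arr → Spec_solution arr (solution arr)

-- ===== LEMMAS AND PROOFS =====

-- strict lexicographic (reading) order on cells
def lexLt (p q : Int × Int) : Prop := p.1 < q.1 ∨ (p.1 = q.1 ∧ p.2 < q.2)

-- per-row: A's index-filter scan equals B's enumerate-filter comprehension
theorem rowcells_eq (s : String) (j : Int) :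
    ((PySem.List.pyRange 0 (PySem.Str.len s)).filter
        (fun x => PySem.Str.pyGet? s x == some '#')).map (fun x => (j, x))
    = ((PySem.List.enumerate s.toList).filter (fun q => q.2 == '#')).map
        (fun q => (j, q.1)) := by
  rw [PySem.List.enumerate_eq_map_pyRange s.toList ' ', List.filter_map, List.map_map]
  rw [PySem.Str.len_eq]
  have hlen : PySem.List.len s.toList = (s.toList.length : Int) := by
    simp [PySem.List.len]
  rw [hlen]
  have hfun : ((fun q : Int × Char => (j, q.1)) ∘ (fun x => (x, PySem.List.pyGetD s.toList x ' '))) = fun x => (j, x) := rfl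
  rw [hfun]
  congr 1
  apply List.filter_congr
  intro x hx
  rw [PySem.List.mem_pyRange_one] at hx
  simp only [Function.comp, PySem.Str.pyGet?, PySem.Chars.pyGet?_eq_listPyGet?]
  rw [PySem.List.pyGet?_of_nonneg_of_lt _ hx.1 (by exact_mod_cast hx.2)]
  rw [PySem.List.pyGetD_eq_getElem _ ' ' hx.1 (by exact_mod_cast hx.2)]
  have hx2 : x.toNat < s.toList.length := by omega
  simp [List.getElem?_eq_getElem hx2]

-- A's scan and B's comprehension produce the same cell list
theorem cells_eq (arr : List String) : get_indices arr '#' = pyCells arr := by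
  have h1 : get_indices arr '#'
      = (PySem.List.pyRange 0 (arr.length : Int)).flatMap (fun i =>
          ((PySem.List.pyRange 0 (PySem.Str.len ((PySem.List.pyGet? arr i).getD ""))).filter
              (fun x => PySem.Str.pyGet? ((PySem.List.pyGet? arr i).getD "") x == some '#')).map
            (fun x => (i, x))) := by
    show (PySem.List.pyRange 0 (arr.length : Int)).foldl (fun result i => result ++ _) [] = _
    rw [PySem.List.foldl_append_eq_flatMap]
    simp
  rw [h1]
  unfold pyCells
  rw [PySem.List.enumerate_eq_map_pyRange arr ""]
  have hlen : PySem.List.len arr = (arr.length : Int) := by simp [PySem.List.len]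
  rw [hlen, List.flatMap_map]
  rw [List.flatMap_def, List.flatMap_def]
  congr 1
  apply List.map_congr_left
  intro j hj
  rw [PySem.List.mem_pyRange_one] at hj
  have hlt : j < (arr.length : Int) := hj.2
  have hrow : (PySem.List.pyGet? arr j).getD "" = PySem.List.pyGetD arr j "" := by
    rw [PySem.List.pyGet?_of_nonneg_of_lt _ hj.1 hlt,
        PySem.List.pyGetD_eq_getElem _ _ hj.1 hlt]
    simp [List.getElem?_eq_getElem (show j.toNat < arr.length by omega)]
  rw [hrow]
  exact rowcells_eq _ j

-- the cell list is strictly increasing in reading order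
theorem cells_sorted (arr : List String) : (pyCells arr).Pairwise lexLt := by
  unfold pyCells
  rw [List.flatMap_def]
  rw [List.pairwise_flatten]
  refine ⟨?_, ?_⟩
  · intro chunk hchunk
    rw [List.mem_map] at hchunk
    obtain ⟨p, _, rfl⟩ := hchunk
    apply List.Pairwise.map
    · intro a b hab
      exact Or.inr ⟨rfl, hab⟩
    · exact (PySem.List.pairwise_lt_enumerate p.2.toList 0).filter _
  · rw [List.pairwise_map]
    apply (PySem.List.pairwise_lt_enumerate arr 0).imp
    intro a b hab x hx y hy
    rw [List.mem_map] at hx hy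
    obtain ⟨qa, _, rfl⟩ := hx
    obtain ⟨qb, _, rfl⟩ := hy
    exact Or.inl hab

-- given a reading-order-sorted 4-cell list, A's branch cascade accepts iff the
-- offset triple is in B's table
set_option maxHeartbeats 1000000 in
theorem core (a0 b0 a1 b1 a2 b2 a3 b3 : Int)
    (h01 : a0 < a1 ∨ (a0 = a1 ∧ b0 < b1)) (h02 : a0 < a2 ∨ (a0 = a2 ∧ b0 < b2))
    (h03 : a0 < a3 ∨ (a0 = a3 ∧ b0 < b3)) (h12 : a1 < a2 ∨ (a1 = a2 ∧ b1 < b2))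
    (h13 : a1 < a3 ∨ (a1 = a3 ∧ b1 < b3)) (h23 : a2 < a3 ∨ (a2 = a3 ∧ b2 < b3)) :
    (        ((a1 = a0 + 1 ∧ b1 = b0) ∧ (a2 = a0 + 1 + 1 ∧ b2 = b0) ∧ a3 = a0 + 1 + 1 + 1 ∧ b3 = b0 ∨
            (a1 = a0 ∧ b1 = b0 + 1) ∧ (a2 = a0 ∧ b2 = b0 + 1 + 1) ∧ a3 = a0 ∧ b3 = b0 + 1 + 1 + 1) ∨
          ((b0 + 1 = b0 ∨ a0 = a1 ∧ b0 + 1 = b1 ∨ a0 = a2 ∧ b0 + 1 = b2 ∨ a0 = a3 ∧ b0 + 1 = b3) ∧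
                (a0 + 1 = a0 ∨ a0 + 1 = a1 ∧ b0 = b1 ∨ a0 + 1 = a2 ∧ b0 = b2 ∨ a0 + 1 = a3 ∧ b0 = b3)) ∧
              (a0 + 1 = a0 ∧ b0 + 1 = b0 ∨
                a0 + 1 = a1 ∧ b0 + 1 = b1 ∨ a0 + 1 = a2 ∧ b0 + 1 = b2 ∨ a0 + 1 = a3 ∧ b0 + 1 = b3) ∨
            ((b0 + 1 = b0 ∨ a0 = a1 ∧ b0 + 1 = b1 ∨ a0 = a2 ∧ b0 + 1 = b2 ∨ a0 = a3 ∧ b0 + 1 = b3) ∧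
                  (b0 + 2 = b0 ∨ a0 = a1 ∧ b0 + 2 = b1 ∨ a0 = a2 ∧ b0 + 2 = b2 ∨ a0 = a3 ∧ b0 + 2 = b3)) ∧
                (a0 + 1 = a0 ∨ a0 + 1 = a1 ∧ b0 = b1 ∨ a0 + 1 = a2 ∧ b0 = b2 ∨ a0 + 1 = a3 ∧ b0 = b3) ∨
              ((b0 + 1 = b0 ∨ a0 = a1 ∧ b0 + 1 = b1 ∨ a0 = a2 ∧ b0 + 1 = b2 ∨ a0 = a3 ∧ b0 + 1 = b3) ∧
                    (b0 + 2 = b0 ∨ a0 = a1 ∧ b0 + 2 = b1 ∨ a0 = a2 ∧ b0 + 2 = b2 ∨ a0 = a3 ∧ b0 + 2 = b3)) ∧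
                  (a0 + 1 = a0 ∧ b0 + 2 = b0 ∨
                    a0 + 1 = a1 ∧ b0 + 2 = b1 ∨ a0 + 1 = a2 ∧ b0 + 2 = b2 ∨ a0 + 1 = a3 ∧ b0 + 2 = b3) ∨
                ((a0 + 1 = a0 ∨ a0 + 1 = a1 ∧ b0 = b1 ∨ a0 + 1 = a2 ∧ b0 = b2 ∨ a0 + 1 = a3 ∧ b0 = b3) ∧
                      (a0 + 1 = a0 ∧ b0 + 1 = b0 ∨
                        a0 + 1 = a1 ∧ b0 + 1 = b1 ∨ a0 + 1 = a2 ∧ b0 + 1 = b2 ∨ a0 + 1 = a3 ∧ b0 + 1 = b3)) ∧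
                    (a0 + 1 = a0 ∧ b0 + 2 = b0 ∨
                      a0 + 1 = a1 ∧ b0 + 2 = b1 ∨ a0 + 1 = a2 ∧ b0 + 2 = b2 ∨ a0 + 1 = a3 ∧ b0 + 2 = b3) ∨
                  ((a0 + 1 = a0 ∧ b0 - 2 = b0 ∨
                          a0 + 1 = a1 ∧ b0 - 2 = b1 ∨ a0 + 1 = a2 ∧ b0 - 2 = b2 ∨ a0 + 1 = a3 ∧ b0 - 2 = b3) ∧
                        (a0 + 1 = a0 ∧ b0 - 1 = b0 ∨
                          a0 + 1 = a1 ∧ b0 - 1 = b1 ∨ a0 + 1 = a2 ∧ b0 - 1 = b2 ∨ a0 + 1 = a3 ∧ b0 - 1 = b3)) ∧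
                      (a0 + 1 = a0 ∨ a0 + 1 = a1 ∧ b0 = b1 ∨ a0 + 1 = a2 ∧ b0 = b2 ∨ a0 + 1 = a3 ∧ b0 = b3) ∨
                    ((a0 + 1 = a0 ∨ a0 + 1 = a1 ∧ b0 = b1 ∨ a0 + 1 = a2 ∧ b0 = b2 ∨ a0 + 1 = a3 ∧ b0 = b3) ∧
                          (a0 + 2 = a0 ∨ a0 + 2 = a1 ∧ b0 = b1 ∨ a0 + 2 = a2 ∧ b0 = b2 ∨ a0 + 2 = a3 ∧ b0 = b3)) ∧
                        (a0 + 2 = a0 ∧ b0 + 1 = b0 ∨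
                          a0 + 2 = a1 ∧ b0 + 1 = b1 ∨ a0 + 2 = a2 ∧ b0 + 1 = b2 ∨ a0 + 2 = a3 ∧ b0 + 1 = b3) ∨
                      ((a0 + 1 = a0 ∨ a0 + 1 = a1 ∧ b0 = b1 ∨ a0 + 1 = a2 ∧ b0 = b2 ∨ a0 + 1 = a3 ∧ b0 = b3) ∧
                            (a0 + 2 = a0 ∨ a0 + 2 = a1 ∧ b0 = b1 ∨ a0 + 2 = a2 ∧ b0 = b2 ∨ a0 + 2 = a3 ∧ b0 = b3)) ∧
                          (a0 + 2 = a0 ∧ b0 - 1 = b0 ∨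
                            a0 + 2 = a1 ∧ b0 - 1 = b1 ∨ a0 + 2 = a2 ∧ b0 - 1 = b2 ∨ a0 + 2 = a3 ∧ b0 - 1 = b3) ∨
                        ((a0 + 1 = a0 ∨ a0 + 1 = a1 ∧ b0 = b1 ∨ a0 + 1 = a2 ∧ b0 = b2 ∨ a0 + 1 = a3 ∧ b0 = b3) ∧
                              (a0 + 1 = a0 ∧ b0 + 1 = b0 ∨
                                a0 + 1 = a1 ∧ b0 + 1 = b1 ∨ a0 + 1 = a2 ∧ b0 + 1 = b2 ∨ a0 + 1 = a3 ∧ b0 + 1 = b3)) ∧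
                            (a0 + 2 = a0 ∧ b0 + 1 = b0 ∨
                              a0 + 2 = a1 ∧ b0 + 1 = b1 ∨ a0 + 2 = a2 ∧ b0 + 1 = b2 ∨ a0 + 2 = a3 ∧ b0 + 1 = b3) ∨
                          ((a0 + 1 = a0 ∨ a0 + 1 = a1 ∧ b0 = b1 ∨ a0 + 1 = a2 ∧ b0 = b2 ∨ a0 + 1 = a3 ∧ b0 = b3) ∧
                                (a0 + 1 = a0 ∧ b0 + 1 = b0 ∨
                                  a0 + 1 = a1 ∧ b0 + 1 = b1 ∨ a0 + 1 = a2 ∧ b0 + 1 = b2 ∨ a0 + 1 = a3 ∧ b0 + 1 = b3)) ∧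
                              (a0 + 2 = a0 ∧ b0 + 1 = b0 ∨
                                a0 + 2 = a1 ∧ b0 + 1 = b1 ∨ a0 + 2 = a2 ∧ b0 + 1 = b2 ∨ a0 + 2 = a3 ∧ b0 + 1 = b3) ∨
                            ((b0 + 1 = b0 ∨ a0 = a1 ∧ b0 + 1 = b1 ∨ a0 = a2 ∧ b0 + 1 = b2 ∨ a0 = a3 ∧ b0 + 1 = b3) ∧
                                  (a0 + 1 = a0 ∧ b0 + 1 = b0 ∨
                                    a0 + 1 = a1 ∧ b0 + 1 = b1 ∨
                                      a0 + 1 = a2 ∧ b0 + 1 = b2 ∨ a0 + 1 = a3 ∧ b0 + 1 = b3)) ∧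
                                (a0 + 1 = a0 ∧ b0 + 2 = b0 ∨
                                  a0 + 1 = a1 ∧ b0 + 2 = b1 ∨ a0 + 1 = a2 ∧ b0 + 2 = b2 ∨ a0 + 1 = a3 ∧ b0 + 2 = b3) ∨
                              ((b0 + 1 = b0 ∨ a0 = a1 ∧ b0 + 1 = b1 ∨ a0 = a2 ∧ b0 + 1 = b2 ∨ a0 = a3 ∧ b0 + 1 = b3) ∧
                                    (a0 + 1 = a0 ∧ b0 - 1 = b0 ∨
                                      a0 + 1 = a1 ∧ b0 - 1 = b1 ∨
                                        a0 + 1 = a2 ∧ b0 - 1 = b2 ∨ a0 + 1 = a3 ∧ b0 - 1 = b3)) ∧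
                                  (a0 + 1 = a0 ∨
                                    a0 + 1 = a1 ∧ b0 = b1 ∨ a0 + 1 = a2 ∧ b0 = b2 ∨ a0 + 1 = a3 ∧ b0 = b3) ∨
                                ((b0 + 1 = b0 ∨ a0 = a1 ∧ b0 + 1 = b1 ∨ a0 = a2 ∧ b0 + 1 = b2 ∨ a0 = a3 ∧ b0 + 1 = b3) ∧
                                      (b0 + 2 = b0 ∨
                                        a0 = a1 ∧ b0 + 2 = b1 ∨ a0 = a2 ∧ b0 + 2 = b2 ∨ a0 = a3 ∧ b0 + 2 = b3)) ∧
                                    (a0 + 1 = a0 ∧ b0 + 1 = b0 ∨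
                                      a0 + 1 = a1 ∧ b0 + 1 = b1 ∨
                                        a0 + 1 = a2 ∧ b0 + 1 = b2 ∨ a0 + 1 = a3 ∧ b0 + 1 = b3) ∨
                                  ((b0 + 1 = b0 ∨
                                          a0 = a1 ∧ b0 + 1 = b1 ∨ a0 = a2 ∧ b0 + 1 = b2 ∨ a0 = a3 ∧ b0 + 1 = b3) ∧
                                        (b0 + 2 = b0 ∨
                                          a0 = a1 ∧ b0 + 2 = b1 ∨ a0 = a2 ∧ b0 + 2 = b2 ∨ a0 = a3 ∧ b0 + 2 = b3)) ∧
                                      (a0 - 1 = a0 ∧ b0 + 1 = b0 ∨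
                                        a0 - 1 = a1 ∧ b0 + 1 = b1 ∨
                                          a0 - 1 = a2 ∧ b0 + 1 = b2 ∨ a0 - 1 = a3 ∧ b0 + 1 = b3) ∨
                                    ((a0 + 1 = a0 ∨
                                            a0 + 1 = a1 ∧ b0 = b1 ∨ a0 + 1 = a2 ∧ b0 = b2 ∨ a0 + 1 = a3 ∧ b0 = b3) ∧
                                          (a0 + 1 = a0 ∧ b0 + 1 = b0 ∨
                                            a0 + 1 = a1 ∧ b0 + 1 = b1 ∨
                                              a0 + 1 = a2 ∧ b0 + 1 = b2 ∨ a0 + 1 = a3 ∧ b0 + 1 = b3)) ∧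
                                        (a0 + 2 = a0 ∨
                                          a0 + 2 = a1 ∧ b0 = b1 ∨ a0 + 2 = a2 ∧ b0 = b2 ∨ a0 + 2 = a3 ∧ b0 = b3) ∨
                                      ((a0 + 1 = a0 ∨
                                            a0 + 1 = a1 ∧ b0 = b1 ∨ a0 + 1 = a2 ∧ b0 = b2 ∨ a0 + 1 = a3 ∧ b0 = b3) ∧
                                          (a0 + 1 = a0 ∧ b0 - 1 = b0 ∨
                                            a0 + 1 = a1 ∧ b0 - 1 = b1 ∨
                                              a0 + 1 = a2 ∧ b0 - 1 = b2 ∨ a0 + 1 = a3 ∧ b0 - 1 = b3)) ∧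
                                        (a0 + 2 = a0 ∨
                                          a0 + 2 = a1 ∧ b0 = b1 ∨ a0 + 2 = a2 ∧ b0 = b2 ∨ a0 + 2 = a3 ∧ b0 = b3))
    ↔ (acceptedShapes.contains [(a1 - a0, b1 - b0), (a2 - a0, b2 - b0), (a3 - a0, b3 - b0)] = true) := by
  simp only [List.contains_eq_mem, decide_eq_true_eq, List.mem_cons, List.not_mem_nil,
    or_false, List.cons.injEq, Prod.mk.injEq, and_true, acceptedShapes]
  constructor
  · rintro ((h|h)|h|h|h|h|h|h|h|h|h|h|h|h|h|h|h)
    · exact Or.inr ((Or.inl (by omega : _)))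
    · exact Or.inl (by omega : _)
    · exact Or.inr (Or.inr ((Or.inl (by omega : _))))
    · exact Or.inr (Or.inr (Or.inr ((Or.inl (by omega : _)))))
    · exact Or.inr (Or.inr (Or.inr (Or.inr ((Or.inl (by omega : _))))))
    · exact Or.inr (Or.inr (Or.inr (Or.inr (Or.inr ((Or.inl (by omega : _)))))))
    · exact Or.inr (Or.inr (Or.inr (Or.inr (Or.inr (Or.inr ((Or.inl (by omega : _))))))))
    · exact Or.inr (Or.inr (Or.inr (Or.inr (Or.inr (Or.inr (Or.inr ((Or.inl (by omega : _)))))))))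
    · exact Or.inr (Or.inr (Or.inr (Or.inr (Or.inr (Or.inr (Or.inr (Or.inr ((Or.inl (by omega : _))))))))))
    · exact Or.inr (Or.inr (Or.inr (Or.inr (Or.inr (Or.inr (Or.inr (Or.inr (Or.inr ((Or.inl (by omega : _)))))))))))
    · exact Or.inr (Or.inr (Or.inr (Or.inr (Or.inr (Or.inr (Or.inr (Or.inr (Or.inr ((Or.inl (by omega : _)))))))))))
    · exact Or.inr (Or.inr (Or.inr (Or.inr (Or.inr (Or.inr (Or.inr (Or.inr (Or.inr (Or.inr ((Or.inl (by omega : _))))))))))))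
    · exact Or.inr (Or.inr (Or.inr (Or.inr (Or.inr (Or.inr (Or.inr (Or.inr (Or.inr (Or.inr (Or.inr ((Or.inl (by omega : _)))))))))))))
    · exact Or.inr (Or.inr (Or.inr (Or.inr (Or.inr (Or.inr (Or.inr (Or.inr (Or.inr (Or.inr (Or.inr (Or.inr ((Or.inl (by omega : _))))))))))))))
    · exfalso; omega
    · exact Or.inr (Or.inr (Or.inr (Or.inr (Or.inr (Or.inr (Or.inr (Or.inr (Or.inr (Or.inr (Or.inr (Or.inr (Or.inr ((Or.inl (by omega : _)))))))))))))))
    · exact Or.inr (Or.inr (Or.inr (Or.inr (Or.inr (Or.inr (Or.inr (Or.inr (Or.inr (Or.inr (Or.inr (Or.inr (Or.inr (Or.inr ((by omega : _)))))))))))))))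
  · rintro (h|h|h|h|h|h|h|h|h|h|h|h|h|h|h)
    · exact Or.inl (Or.inr (by omega : _))
    · exact Or.inl (Or.inl (by omega : _))
    · exact Or.inr ((Or.inl (by omega : _)))
    · exact Or.inr (Or.inr ((Or.inl (by omega : _))))
    · exact Or.inr (Or.inr (Or.inr ((Or.inl (by omega : _)))))
    · exact Or.inr (Or.inr (Or.inr (Or.inr ((Or.inl (by omega : _))))))
    · exact Or.inr (Or.inr (Or.inr (Or.inr (Or.inr ((Or.inl (by omega : _)))))))
    · exact Or.inr (Or.inr (Or.inr (Or.inr (Or.inr (Or.inr ((Or.inl (by omega : _))))))))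
    · exact Or.inr (Or.inr (Or.inr (Or.inr (Or.inr (Or.inr (Or.inr ((Or.inl (by omega : _)))))))))
    · exact Or.inr (Or.inr (Or.inr (Or.inr (Or.inr (Or.inr (Or.inr (Or.inr ((Or.inl (by omega : _))))))))))
    · exact Or.inr (Or.inr (Or.inr (Or.inr (Or.inr (Or.inr (Or.inr (Or.inr (Or.inr (Or.inr ((Or.inl (by omega : _))))))))))))
    · exact Or.inr (Or.inr (Or.inr (Or.inr (Or.inr (Or.inr (Or.inr (Or.inr (Or.inr (Or.inr (Or.inr ((Or.inl (by omega : _)))))))))))))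
    · exact Or.inr (Or.inr (Or.inr (Or.inr (Or.inr (Or.inr (Or.inr (Or.inr (Or.inr (Or.inr (Or.inr (Or.inr ((Or.inl (by omega : _))))))))))))))
    · exact Or.inr (Or.inr (Or.inr (Or.inr (Or.inr (Or.inr (Or.inr (Or.inr (Or.inr (Or.inr (Or.inr (Or.inr (Or.inr (Or.inr ((Or.inl (by omega : _))))))))))))))))
    · exact Or.inr (Or.inr (Or.inr (Or.inr (Or.inr (Or.inr (Or.inr (Or.inr (Or.inr (Or.inr (Or.inr (Or.inr (Or.inr (Or.inr (Or.inr ((by omega : _))))))))))))))))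

-- a cascade of ifs all returning "YES" collapses to a disjunction
theorem iteYesOr (c d : Prop) [Decidable c] [Decidable d] :
    (if c then "YES" else if d then "YES" else "NO") = if c ∨ d then "YES" else "NO" := by
  by_cases hc : c <;> by_cases hd : d <;> simp [hc, hd]

set_option maxHeartbeats 4000000 in
theorem solution_eq (arr : List String) : solution arr = solution_alt arr := by
  unfold solution solution_alt
  rw [cells_eq]
  have hs := cells_sorted arr
  generalize pyCells arr = L at *
  by_cases h4 : L.length = 4
  case neg => simp [h4]
  case pos =>
    rcases L with _ | ⟨⟨a0,b0⟩, _ | ⟨⟨a1,b1⟩, _ | ⟨⟨a2,b2⟩, _ | ⟨⟨a3,b3⟩, _ | rest⟩⟩⟩⟩ <;>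
      simp only [List.length_nil, List.length_cons] at h4 <;> try omega
    clear h4
    simp only [List.pairwise_cons, List.not_mem_nil, List.mem_cons,
      lexLt, List.Pairwise.nil, and_true] at hs
    have h4 : ∀ x : Int, PySem.List.pyRange x (x+4) = [x, x+1, x+1+1, x+1+1+1] := by
      intro x
      rw [PySem.List.pyRange_one_cons (by omega), PySem.List.pyRange_one_cons (by omega),
          PySem.List.pyRange_one_cons (by omega), PySem.List.pyRange_one_cons (by omega),
          PySem.List.pyRange_one_eq_nil (by omega)]
    simp only [PySem.List.pyGet?_zero_cons, Option.getD_some]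
    simp only [List.length_cons, List.length_nil, h4, List.map_cons, List.map_nil,
      List.drop_succ_cons, List.drop_zero, acceptedShapes, List.contains_eq_mem, beq_iff_eq,
      Bool.or_eq_true, Bool.and_eq_true, decide_eq_true_eq, List.mem_cons,
      List.not_mem_nil, or_false, List.cons.injEq, Prod.mk.injEq, and_true, ne_eq,
      not_true, if_false, true_and]
    obtain ⟨hs0, hs1, hs2, -⟩ := hs
    have h01 : a0 < a1 ∨ (a0 = a1 ∧ b0 < b1) := hs0 (a1,b1) (Or.inl rfl)
    have h02 : a0 < a2 ∨ (a0 = a2 ∧ b0 < b2) := hs0 (a2,b2) (Or.inr (Or.inl rfl))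
    have h03 : a0 < a3 ∨ (a0 = a3 ∧ b0 < b3) := hs0 (a3,b3) (Or.inr (Or.inr (Or.inl rfl)))
    have h12 : a1 < a2 ∨ (a1 = a2 ∧ b1 < b2) := hs1 (a2,b2) (Or.inl rfl)
    have h13 : a1 < a3 ∨ (a1 = a3 ∧ b1 < b3) := hs1 (a3,b3) (Or.inr (Or.inl rfl))
    have h23 : a2 < a3 ∨ (a2 = a3 ∧ b2 < b3) := hs2 (a3,b3) (Or.inl rfl)
    clear hs0 hs1 hs2
    simp only [iteYesOr]
    split_ifs with hA hB hB'
    · rfl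
    · exact absurd ((core a0 b0 a1 b1 a2 b2 a3 b3 h01 h02 h03 h12 h13 h23).mp hA) hB
    · exact absurd ((core a0 b0 a1 b1 a2 b2 a3 b3 h01 h02 h03 h12 h13 h23).mpr hB') hA
    · rfl

-- ===== VERDICT (by name: the statement is the Claim_ definition above) =====
theorem solution_spec : Claim_equal_solution := by
  intro arr _
  exact solution_eq arr
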